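-- pv_equiv track=rewrite | github.com/heinzdev20/reVoAgent | packages/agents/security_agent.py | _analyze_security_task_type
-- ===== SOURCE A (Python) =====
-- def _analyze_security_task_type(description: str) -> str:
--     """Analyze task description to determine security analysis type."""
--     description_lower = description.lower()
--
--     if any(keyword in description_lower for keyword in ["code", "source", "static analysis"]):
--         return "code_security_analysis"
--     elif any(keyword in description_lower for keyword in ["vulnerability", "vuln", "cve"]):
--         return "vulnerability_assessment"
--     elif any(keyword in description_lower for keyword in ["penetration", "pentest", "pen test"]):
--         return "penetration_testing"
--     elif any(keyword in description_lower for keyword in ["configuration", "config", "hardening"]):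
--         return "security_configuration"
--     elif any(keyword in description_lower for keyword in ["compliance", "audit", "policy"]):
--         return "compliance_check"
--     elif any(keyword in description_lower for keyword in ["network", "firewall", "ports"]):
--         return "network_security"
--     else:
--         return "general_security_analysis"
-- ===== SOURCE B (Python) =====
-- _KEYWORD_PRIORITY = [
--     ("code", 0), ("source", 0), ("static analysis", 0),
--     ("vulnerability", 1), ("vuln", 1), ("cve", 1),
--     ("penetration", 2), ("pentest", 2), ("pen test", 2),
--     ("configuration", 3), ("config", 3), ("hardening", 3),
--     ("compliance", 4), ("audit", 4), ("policy", 4),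
--     ("network", 5), ("firewall", 5), ("ports", 5),
-- ]
--
-- _LABELS = [
--     "code_security_analysis",
--     "vulnerability_assessment",
--     "penetration_testing",
--     "security_configuration",
--     "compliance_check",
--     "network_security",
--     "general_security_analysis",
-- ]
--
-- def _analyze_security_task_type(description: str) -> str:
--     # Scan every keyword, keep the best (lowest) matched priority; no early return.
--     d = description.lower()
--     best = len(_LABELS) - 1
--     for kw, pri in _KEYWORD_PRIORITY:
--         if kw in d:
--             best = min(best, pri)
--     return _LABELS[best]
-- ===== Notes on version B (the rewrite author's own statement) =====
-- stated objective: alternative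
-- what changed: Replaces the early-returning if/elif branch cascade with a single accumulator pass: every keyword carries a numeric priority, one fold computes the minimum priority among ALL matched keywords (no early exit), and the label is obtained by indexing a label table with that minimum.
import Mathlib
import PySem

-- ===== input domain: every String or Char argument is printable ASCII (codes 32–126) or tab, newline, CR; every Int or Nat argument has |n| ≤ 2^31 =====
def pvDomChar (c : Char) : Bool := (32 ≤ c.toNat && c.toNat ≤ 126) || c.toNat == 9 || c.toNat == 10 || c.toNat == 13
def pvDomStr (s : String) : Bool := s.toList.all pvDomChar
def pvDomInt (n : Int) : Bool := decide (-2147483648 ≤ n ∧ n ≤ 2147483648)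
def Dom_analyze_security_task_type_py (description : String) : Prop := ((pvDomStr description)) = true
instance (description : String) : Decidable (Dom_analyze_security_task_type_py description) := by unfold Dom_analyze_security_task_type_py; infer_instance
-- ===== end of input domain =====

-- B replaces A's early-returning if/elif cascade by a min-priority accumulator pass over a flat
-- keyword→priority list, then indexes a label table with the minimum matched priority ("alternative").

-- ===== PORT A =====
def analyze_security_task_type_py (description : String) : String :=
  let description_lower := PySem.Str.lower description
  if ["code", "source", "static analysis"].any (fun keyword => PySem.Str.isIn keyword description_lower) then
    "code_security_analysis"
  else if ["vulnerability", "vuln", "cve"].any (fun keyword => PySem.Str.isIn keyword description_lower) then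
    "vulnerability_assessment"
  else if ["penetration", "pentest", "pen test"].any (fun keyword => PySem.Str.isIn keyword description_lower) then
    "penetration_testing"
  else if ["configuration", "config", "hardening"].any (fun keyword => PySem.Str.isIn keyword description_lower) then
    "security_configuration"
  else if ["compliance", "audit", "policy"].any (fun keyword => PySem.Str.isIn keyword description_lower) then
    "compliance_check"
  else if ["network", "firewall", "ports"].any (fun keyword => PySem.Str.isIn keyword description_lower) then
    "network_security"
  else
    "general_security_analysis"

-- ===== PORT B =====
def flatKeywordPriorities : List (String × Nat) :=
  [ ("code", 0), ("source", 0), ("static analysis", 0),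
    ("vulnerability", 1), ("vuln", 1), ("cve", 1),
    ("penetration", 2), ("pentest", 2), ("pen test", 2),
    ("configuration", 3), ("config", 3), ("hardening", 3),
    ("compliance", 4), ("audit", 4), ("policy", 4),
    ("network", 5), ("firewall", 5), ("ports", 5) ]

def securityLabels : List String :=
  [ "code_security_analysis", "vulnerability_assessment", "penetration_testing",
    "security_configuration", "compliance_check", "network_security",
    "general_security_analysis" ]

def analyze_security_task_type_py_alt (description : String) : String :=
  let d := PySem.Str.lower description
  let best := flatKeywordPriorities.foldl
    (fun acc kp => if PySem.Str.isIn kp.1 d then min acc kp.2 else acc) 6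
  securityLabels.getD best "general_security_analysis"

-- ===== PRECONDITION & SPEC =====
def Spec_analyze_security_task_type_py (description : String) (out : String) : Prop := out = analyze_security_task_type_py_alt description
instance (description : String) (out : String) : Decidable (Spec_analyze_security_task_type_py description out) := by unfold Spec_analyze_security_task_type_py; infer_instance

-- ===== CLAIM (what is proved, stated in full; the proofs are below) =====
def Claim_equal_analyze_security_task_type_py : Prop := ∀ (description : String), Dom_analyze_security_task_type_py description → Spec_analyze_security_task_type_py description (analyze_security_task_type_py description)

-- ===== LEMMAS AND PROOFS =====

-- Folding the min-priority accumulator over one group of three keywords sharing priority i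
-- is the same as one test of the group's disjunction (min is idempotent and associative).
theorem pv_groupfold (d k1 k2 k3 : String) (i a : Nat) :
    List.foldl (fun acc kp => if PySem.Str.isIn kp.1 d then min acc kp.2 else acc) a
      [(k1, i), (k2, i), (k3, i)]
    = if PySem.Str.isIn k1 d || (PySem.Str.isIn k2 d || PySem.Str.isIn k3 d) then min a i else a := by
  by_cases h1 : PySem.Chars.isIn k1.toList d.toList = true <;>
    by_cases h2 : PySem.Chars.isIn k2.toList d.toList = true <;>
    by_cases h3 : PySem.Chars.isIn k3.toList d.toList = true <;>
    simp [List.foldl, h1, h2, h3]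

-- ===== VERDICT (by name: the statement is the Claim_ definition above) =====
theorem analyze_security_task_type_py_spec : Claim_equal_analyze_security_task_type_py := by
  intro description _
  unfold Spec_analyze_security_task_type_py analyze_security_task_type_py analyze_security_task_type_py_alt
  have hsplit : flatKeywordPriorities
      = [(("code" : String), (0 : Nat)), ("source", 0), ("static analysis", 0)]
        ++ ([("vulnerability", 1), ("vuln", 1), ("cve", 1)]
        ++ ([("penetration", 2), ("pentest", 2), ("pen test", 2)]
        ++ ([("configuration", 3), ("config", 3), ("hardening", 3)]
        ++ ([("compliance", 4), ("audit", 4), ("policy", 4)]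
        ++ [("network", 5), ("firewall", 5), ("ports", 5)])))) := rfl
  rw [hsplit]
  simp only [List.foldl_append, pv_groupfold, List.any_cons, List.any_nil, Bool.or_false]
  generalize (PySem.Str.isIn "code" (PySem.Str.lower description) || (PySem.Str.isIn "source" (PySem.Str.lower description) || PySem.Str.isIn "static analysis" (PySem.Str.lower description))) = g0
  generalize (PySem.Str.isIn "vulnerability" (PySem.Str.lower description) || (PySem.Str.isIn "vuln" (PySem.Str.lower description) || PySem.Str.isIn "cve" (PySem.Str.lower description))) = g1
  generalize (PySem.Str.isIn "penetration" (PySem.Str.lower description) || (PySem.Str.isIn "pentest" (PySem.Str.lower description) || PySem.Str.isIn "pen test" (PySem.Str.lower description))) = g2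
  generalize (PySem.Str.isIn "configuration" (PySem.Str.lower description) || (PySem.Str.isIn "config" (PySem.Str.lower description) || PySem.Str.isIn "hardening" (PySem.Str.lower description))) = g3
  generalize (PySem.Str.isIn "compliance" (PySem.Str.lower description) || (PySem.Str.isIn "audit" (PySem.Str.lower description) || PySem.Str.isIn "policy" (PySem.Str.lower description))) = g4
  generalize (PySem.Str.isIn "network" (PySem.Str.lower description) || (PySem.Str.isIn "firewall" (PySem.Str.lower description) || PySem.Str.isIn "ports" (PySem.Str.lower description))) = g5
  revert g0 g1 g2 g3 g4 g5
  decide
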